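-- pv_equiv track=rewrite | github.com/daniel-reich/ubiquitous-fiesta | kiX7WjSFeTmBYcEgK_11.py | major_sum
-- ===== SOURCE A (Python) =====
-- def major_sum(l):
--   p=sum([i for i in l if i>0])
--   n=sum([i for i in l if i<0])
--   z=[i for i in l if i==0].count(0)
--   a=[p,n,z]
--   if -(n)>p and -n>z:
--     return n
--   else:
--     return max(p,z)
-- ===== SOURCE B (Python) =====
-- def major_sum(l):
--   def triple(lo, hi):
--     if hi <= lo:
--       return (0, 0, 0)
--     if hi == lo + 1:
--       i = l[lo]
--       if i > 0:
--         return (i, 0, 0)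
--       if i < 0:
--         return (0, i, 0)
--       return (0, 0, 1)
--     mid = (lo + hi) // 2
--     p1, n1, z1 = triple(lo, mid)
--     p2, n2, z2 = triple(mid, hi)
--     return (p1 + p2, n1 + n2, z1 + z2)
--   p, n, z = triple(0, len(l))
--   if -n > p and -n > z:
--     return n
--   return max(p, z)
-- ===== Notes on version B (the rewrite author's own statement) =====
-- stated objective: alternative
-- what changed: Replaces A's three filter+sum/count scans with a divide-and-conquer recursion over index ranges that merges (positive-sum, negative-sum, zero-count) triples from halves, then applies the same final decision.
import Mathlib
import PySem

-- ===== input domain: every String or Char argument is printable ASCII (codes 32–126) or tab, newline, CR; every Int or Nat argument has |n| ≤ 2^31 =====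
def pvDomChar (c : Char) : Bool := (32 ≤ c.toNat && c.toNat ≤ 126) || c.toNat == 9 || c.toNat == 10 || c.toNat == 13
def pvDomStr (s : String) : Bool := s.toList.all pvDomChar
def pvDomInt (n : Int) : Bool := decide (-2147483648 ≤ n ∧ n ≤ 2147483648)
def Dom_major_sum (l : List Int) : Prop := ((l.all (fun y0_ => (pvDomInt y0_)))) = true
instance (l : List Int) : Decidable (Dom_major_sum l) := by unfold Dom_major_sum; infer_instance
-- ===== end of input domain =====

-- B replaces A's three filter scans by a divide-and-conquer recursion merging (p,n,z) triples (objective: alternative).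
-- ===== PORT A =====
-- Literal transliteration of A: two filter+sum passes, a filter+count pass, then the decision.
def major_sum (l : List Int) : Int :=
  let p : Int := ((l.filter (fun i => decide (i > 0))).foldl (· + ·) 0)
  let n : Int := ((l.filter (fun i => decide (i < 0))).foldl (· + ·) 0)
  let z : Int := ((l.filter (fun i => decide (i = 0))).count 0 : Nat)
  if -n > p ∧ -n > z then n else max p z

-- ===== PORT B =====
-- Port of B's inner helper `triple(lo, hi)`: divide-and-conquer over index ranges.
-- l[lo] is in range on every call reached from major_sum_alt (lo < hi ≤ len); ported as getD (exact there).
def msTriple (l : List Int) (lo hi : Nat) : Int × Int × Int :=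
  if hi ≤ lo then (0, 0, 0)
  else if hi = lo + 1 then
    let i := l.getD lo 0
    if i > 0 then (i, 0, 0)
    else if i < 0 then (0, i, 0)
    else (0, 0, 1)
  else
    let mid := (lo + hi) / 2
    let t1 := msTriple l lo mid
    let t2 := msTriple l mid hi
    (t1.1 + t2.1, t1.2.1 + t2.2.1, t1.2.2 + t2.2.2)
termination_by hi - lo
decreasing_by all_goals omega

def major_sum_alt (l : List Int) : Int :=
  let t := msTriple l 0 l.length
  if -t.2.1 > t.1 ∧ -t.2.1 > t.2.2 then t.2.1 else max t.1 t.2.2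

-- ===== PRECONDITION & SPEC =====
def Spec_major_sum (l : List Int) (out : Int) : Prop := out = major_sum_alt l
instance (l : List Int) (out : Int) : Decidable (Spec_major_sum l out) := by unfold Spec_major_sum; infer_instance

-- ===== CLAIM (what is proved, stated in full; the proofs are below) =====
def Claim_equal_major_sum : Prop := ∀ (l : List Int), Dom_major_sum l → Spec_major_sum l (major_sum l)

-- ===== LEMMAS AND PROOFS =====
-- The (positive-sum, negative-sum, zero-count) triple of a list, phrased exactly as port A computes it.
def Ftrip (xs : List Int) : Int × Int × Int :=
  ((xs.filter (fun i => decide (i > 0))).foldl (· + ·) 0,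
   (xs.filter (fun i => decide (i < 0))).foldl (· + ·) 0,
   ((xs.filter (fun i => decide (i = 0))).count 0 : Nat))

theorem foldl_add_shift (l : List Int) (a : Int) :
    l.foldl (· + ·) a = a + l.foldl (· + ·) 0 := by
  induction l generalizing a with
  | nil => simp
  | cons x xs ih => simp only [List.foldl_cons]; rw [ih, ih (0 + x)]; ring

theorem Ftrip_append (a b : List Int) :
    Ftrip (a ++ b) = ((Ftrip a).1 + (Ftrip b).1, (Ftrip a).2.1 + (Ftrip b).2.1,
      (Ftrip a).2.2 + (Ftrip b).2.2) := by
  simp only [Ftrip, List.filter_append, List.foldl_append, List.count_append, Prod.mk.injEq]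
  refine ⟨?_, ?_, ?_⟩
  · rw [foldl_add_shift]
  · rw [foldl_add_shift]
  · push_cast; ring

theorem Ftrip_single (x : Int) :
    Ftrip [x] = if x > 0 then (x, 0, 0) else if x < 0 then (0, x, 0) else ((0 : Int), (0 : Int), (1 : Int)) := by
  rcases lt_trichotomy x 0 with h | h | h
  · have hp : ¬ x > 0 := by omega
    have hz : ¬ x = 0 := by omega
    rw [if_neg hp, if_pos h]
    simp [Ftrip, List.filter_cons, hp, h, hz]
  · subst h; simp [Ftrip]
  · have hn : ¬ x < 0 := by omega
    have hz : ¬ x = 0 := by omega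
    rw [if_pos h]
    simp [Ftrip, List.filter_cons, hn, h, hz]

theorem msTriple_eq (l : List Int) :
    ∀ k lo hi, hi - lo = k → hi ≤ l.length →
      msTriple l lo hi = Ftrip ((l.drop lo).take (hi - lo)) := by
  intro k
  induction k using Nat.strong_induction_on with
  | _ k ih =>
    intro lo hi hk hlen
    rw [msTriple]
    by_cases h0 : hi ≤ lo
    · rw [if_pos h0]
      have : hi - lo = 0 := by omega
      simp [this, Ftrip]
    · rw [if_neg h0]
      by_cases h1 : hi = lo + 1
      · rw [if_pos h1]
        have hlo : lo < l.length := by omega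
        have hslice : (l.drop lo).take (hi - lo) = [l[lo]] := by
          have h2 : hi - lo = 1 := by omega
          rw [h2, List.drop_eq_getElem_cons hlo]
          rfl
        have hget : l.getD lo 0 = l[lo] := by
          simp [List.getD, List.getElem?_eq_getElem hlo]
        rw [hslice, Ftrip_single, hget]
      · rw [if_neg h1]
        have hmidlo : lo < (lo + hi) / 2 := by omega
        have hmidhi : (lo + hi) / 2 < hi := by omega
        set mid := (lo + hi) / 2 with hmid
        have e1 := ih (mid - lo) (by omega) lo mid rfl (by omega)
        have e2 := ih (hi - mid) (by omega) mid hi rfl hlen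
        have hsplit : (l.drop lo).take (hi - lo)
            = (l.drop lo).take (mid - lo) ++ ((l.drop lo).drop (mid - lo)).take (hi - mid) := by
          rw [← List.take_add]
          congr 1
          omega
        have hd : lo + (mid - lo) = mid := by omega
        rw [hsplit, Ftrip_append, List.drop_drop, hd]
        dsimp only
        rw [e1, e2]

-- ===== VERDICT =====
theorem major_sum_spec : Claim_equal_major_sum := by
  intro l _
  unfold Spec_major_sum major_sum major_sum_alt
  rw [msTriple_eq l l.length 0 l.length rfl le_rfl]
  simp [Ftrip]
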